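-- pv_equiv track=rewrite | github.com/Inter-Knot-Arena/Inter-Knot-Arena-OCR_Scan | roster_taxonomy.py | _slugify_focus_token
-- ===== SOURCE A (Python) =====
-- def _slugify_focus_token(value: str) -> str:
--     token = str(value or "").strip().lower()
--     if not token:
--         return ""
--     token = token.replace(" - ", " ")
--     token = token.replace("&", " ")
--     token = token.replace(".", "")
--     token = token.replace("'", "")
--     token = token.replace("/", " ")
--     token = token.replace("-", " ")
--     token = "_".join(part for part in token.split() if part)
--     if not token:
--         return ""
--     if token.startswith("agent_"):
--         return token
--     return f"agent_{token}"
-- ===== SOURCE B (Python) =====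
-- def _slugify_focus_token(value: str) -> str:
--     token = str(value or "").strip().lower()
--     if not token:
--         return ""
--     words = []
--     buf = []
--     for ch in token:
--         if ch == "." or ch == "'":
--             continue
--         if ch.isspace() or ch == "&" or ch == "/" or ch == "-":
--             if buf:
--                 words.append("".join(buf))
--                 buf = []
--         else:
--             buf.append(ch)
--     if buf:
--         words.append("".join(buf))
--     if not words:
--         return ""
--     slug = "_".join(words)
--     if slug.startswith("agent_"):
--         return slug
--     return "agent_" + slug
-- ===== Notes on version B (the rewrite author's own statement) =====
-- stated objective: alternative
-- what changed: Replaces the chain of six str.replace passes followed by split and join with a single character-by-character scan that deletes dots and apostrophes, flushes a word buffer at whitespace and at the ampersand/slash/hyphen separators, and joins the collected words.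
import Mathlib
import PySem

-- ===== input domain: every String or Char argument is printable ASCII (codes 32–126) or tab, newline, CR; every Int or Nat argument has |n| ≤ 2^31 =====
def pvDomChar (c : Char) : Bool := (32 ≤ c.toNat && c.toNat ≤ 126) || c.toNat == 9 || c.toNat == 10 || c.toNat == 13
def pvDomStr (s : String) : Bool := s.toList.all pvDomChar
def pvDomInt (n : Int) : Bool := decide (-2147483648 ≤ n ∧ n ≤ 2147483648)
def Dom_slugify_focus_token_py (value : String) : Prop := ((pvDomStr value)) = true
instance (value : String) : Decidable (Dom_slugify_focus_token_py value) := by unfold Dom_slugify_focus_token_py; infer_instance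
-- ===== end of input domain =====

-- B replaces A's chain of six str.replace passes + split by a single character scan
-- that buffers words directly (objective: alternative decomposition, same cost).

-- ===== PORT A =====
-- literal port of A: strip/lower, six replaces, split, join, prefix
def slugify_focus_token_py (value : String) : String :=
  let token := PySem.Chars.lower (PySem.Chars.strip (if value = "" then [] else value.toList))
  if token.isEmpty then "" else
  let t1 := PySem.Chars.replace token [' ', '-', ' '] [' ']
  let t2 := PySem.Chars.replace t1 ['&'] [' ']
  let t3 := PySem.Chars.replace t2 ['.'] []
  let t4 := PySem.Chars.replace t3 ['\''] []
  let t5 := PySem.Chars.replace t4 ['/'] [' ']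
  let t6 := PySem.Chars.replace t5 ['-'] [' ']
  let token2 := PySem.Chars.join ['_'] ((PySem.Chars.split₀ t6).filter (fun p => !p.isEmpty))
  if token2.isEmpty then "" else
  if PySem.Chars.startswith token2 ['a','g','e','n','t','_'] then String.ofList token2
  else String.ofList ('a'::'g'::'e'::'n'::'t'::'_'::token2)

-- ===== PORT B =====
-- B's loop: drop '.'/'\'' , flush the buffer on whitespace/&//-, else extend the buffer
def pvScanB : List Char → List Char → List (List Char) → List (List Char)
  | [], buf, words => if buf.isEmpty then words else words ++ [buf]
  | c :: rest, buf, words =>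
    if c = '.' ∨ c = '\'' then pvScanB rest buf words
    else if PySem.Chars.isspace c || c = '&' || c = '/' || c = '-' then
      (if buf.isEmpty then pvScanB rest [] words else pvScanB rest [] (words ++ [buf]))
    else pvScanB rest (buf ++ [c]) words

def slugify_focus_token_py_alt (value : String) : String :=
  let token := PySem.Chars.lower (PySem.Chars.strip (if value = "" then [] else value.toList))
  if token.isEmpty then "" else
  let words := pvScanB token [] []
  if words.isEmpty then "" else
  let slug := PySem.Chars.join ['_'] words
  if PySem.Chars.startswith slug ['a','g','e','n','t','_'] then String.ofList slug
  else String.ofList ('a'::'g'::'e'::'n'::'t'::'_'::slug)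

-- ===== PRECONDITION & SPEC =====
def Spec_slugify_focus_token_py (value : String) (out : String) : Prop := out = slugify_focus_token_py_alt value
instance (value : String) (out : String) : Decidable (Spec_slugify_focus_token_py value out) := by unfold Spec_slugify_focus_token_py; infer_instance

-- ===== CLAIM (what is proved, stated in full; the proofs are below) =====
def Claim_equal_slugify_focus_token_py : Prop := ∀ (value : String), Dom_slugify_focus_token_py value → Spec_slugify_focus_token_py value (slugify_focus_token_py value)

-- ===== LEMMAS AND PROOFS =====

-- single-character replace as a structural recursion
def pvRepChar (a : Char) (new : List Char) : List Char → List Char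
  | [] => []
  | c :: t => (if c = a then new else [c]) ++ pvRepChar a new t

-- the " - " → " " replace as a structural recursion
def pvRepSpace : List Char → List Char
  | [] => []
  | c :: t =>
    if [' ', '-', ' '].isPrefixOf (c :: t) then ' ' :: pvRepSpace (t.drop 2)
    else c :: pvRepSpace t
termination_by l => l.length
decreasing_by
  · simp
  · simp

-- per-character effect of the five single-character replaces
def pvM (c : Char) : List Char :=
  if c = '.' ∨ c = '\'' then []
  else if c = '&' ∨ c = '/' ∨ c = '-' then [' ']
  else [c]

theorem pvRepChar_eq_go (a : Char) (new : List Char) :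
    ∀ (l acc : List Char) (fuel : Nat), l.length ≤ fuel →
      PySem.Chars.replace.go [a] new fuel l acc = acc.reverse ++ pvRepChar a new l := by
  intro l
  induction l with
  | nil =>
    intro acc fuel _
    cases fuel <;> simp [PySem.Chars.replace.go, pvRepChar]
  | cons c t ih =>
    intro acc fuel hf
    cases fuel with
    | zero => simp at hf
    | succ fuel =>
      by_cases h : c = a
      · have hp : [a].isPrefixOf (c :: t) = true := by simp [h, List.isPrefixOf]
        simp [PySem.Chars.replace.go, pvRepChar, h]
        simp [ih (new.reverse ++ acc) fuel (by simpa using Nat.lt_succ_iff.mp (Nat.lt_of_lt_of_le (by simp) hf))]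
      · have hp : [a].isPrefixOf (c :: t) = false := by
          simp [List.isPrefixOf]; exact fun hh => h hh.symm
        simp [PySem.Chars.replace.go, hp, pvRepChar, h,
          ih (c :: acc) fuel (by simpa using Nat.lt_succ_iff.mp (Nat.lt_of_lt_of_le (by simp) hf))]

theorem pvReplace_single (a : Char) (new s : List Char) :
    PySem.Chars.replace s [a] new = pvRepChar a new s := by
  simpa using pvRepChar_eq_go a new s [] s.length le_rfl

theorem pvRepSpace_eq_go :
    ∀ (l acc : List Char) (fuel : Nat), l.length ≤ fuel →
      PySem.Chars.replace.go [' ', '-', ' '] [' '] fuel l acc = acc.reverse ++ pvRepSpace l := by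
  intro l acc fuel
  induction fuel generalizing l acc with
  | zero =>
    intro h
    have : l = [] := List.length_eq_zero_iff.mp (Nat.le_zero.mp h)
    subst this
    simp [PySem.Chars.replace.go, pvRepSpace]
  | succ fuel ih =>
    intro h
    cases l with
    | nil => simp [PySem.Chars.replace.go, pvRepSpace]
    | cons c t =>
      by_cases hp : [' ', '-', ' '].isPrefixOf (c :: t) = true
      · obtain ⟨hc, t1, ht⟩ : c = ' ' ∧ ∃ t', t = '-' :: ' ' :: t' := by
          cases t with
          | nil => simp [List.isPrefixOf] at hp
          | cons d u =>
            cases u with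
            | nil => simp [List.isPrefixOf] at hp
            | cons e v =>
              simp [List.isPrefixOf] at hp
              exact ⟨hp.1.symm, v, by simp [← hp.2.1, ← hp.2.2]⟩
        subst hc ht
        rw [pvRepSpace]
        simp only [PySem.Chars.replace.go, hp, if_true]
        have hd : List.drop [' ', '-', ' '].length (' ' :: '-' :: ' ' :: t1) =
            List.drop 2 ('-' :: ' ' :: t1) := by simp
        rw [hd, ih (List.drop 2 ('-' :: ' ' :: t1)) ([' '].reverse ++ acc)
          (by simp at h ⊢; omega)]
        simp
      · simp only [PySem.Chars.replace.go, hp]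
        rw [pvRepSpace]
        rw [ih t (c :: acc) (by simp at h ⊢; omega)]
        simp [hp]

theorem pvReplace_space (s : List Char) :
    PySem.Chars.replace s [' ', '-', ' '] [' '] = pvRepSpace s := by
  simpa using pvRepSpace_eq_go s [] s.length le_rfl

theorem pvRepChar_append (a : Char) (new x y : List Char) :
    pvRepChar a new (x ++ y) = pvRepChar a new x ++ pvRepChar a new y := by
  induction x with
  | nil => simp [pvRepChar]
  | cons c t ih => simp [pvRepChar, ih]

theorem pvChain_eq_flatMap (s : List Char) :
    pvRepChar '-' [' '] (pvRepChar '/' [' '] (pvRepChar '\'' []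
      (pvRepChar '.' [] (pvRepChar '&' [' '] s)))) = s.flatMap pvM := by
  induction s with
  | nil => simp [pvRepChar]
  | cons c t ih =>
    simp only [pvRepChar, pvRepChar_append, List.flatMap_cons, ih]
    congr 1
    by_cases h1 : c = '&'
    · simp [h1, pvRepChar, pvM]
    by_cases h2 : c = '.'
    · simp [h2, pvRepChar, pvM]
    by_cases h3 : c = '\''
    · simp [h3, pvRepChar, pvM]
    by_cases h4 : c = '/'
    · simp [h4, pvRepChar, pvM]
    by_cases h5 : c = '-'
    · simp [h5, pvRepChar, pvM]
    · simp [pvRepChar, pvM, h1, h2, h3, h4, h5]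

theorem pvSplit_go_eq_scan (s : List Char) :
    ∀ (cur : List Char) (acc : List (List Char)),
      PySem.Chars.split₀.go (s.flatMap pvM) cur acc = pvScanB s cur.reverse acc.reverse := by
  induction s with
  | nil =>
    intro cur acc
    simp only [List.flatMap_nil, PySem.Chars.split₀.go, pvScanB, List.isEmpty_reverse]
    by_cases hc : cur.isEmpty <;> simp [hc]
  | cons c t ih =>
    intro cur acc
    by_cases h12 : c = '.' ∨ c = '\''
    · have hm : pvM c = [] := by rcases h12 with h | h <;> simp [pvM, h]
      simp only [List.flatMap_cons, hm, List.nil_append, pvScanB, h12, if_true]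
      exact ih cur acc
    · by_cases hs : c = '&' ∨ c = '/' ∨ c = '-'
      · have hm : pvM c = [' '] := by simp [pvM, h12, hs]
        have hcond : (PySem.Chars.isspace c || c = '&' || c = '/' || c = '-') = true := by
          rcases hs with h | h | h <;> simp [h]
        simp only [List.flatMap_cons, hm, List.cons_append, List.nil_append,
          PySem.Chars.split₀.go, pvScanB, h12, if_false, hcond, if_true,
          List.isEmpty_reverse, show PySem.Chars.isspace ' ' = true by decide]
        by_cases hc : cur.isEmpty
        · simpa [hc] using ih [] acc
        · simpa [hc] using ih [] (cur.reverse :: acc)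
      · have hm : pvM c = [c] := by simp [pvM, h12, hs]
        have hne : (c = '&' ∨ c = '/' ∨ c = '-') = False := by simp [hs]
        by_cases hw : PySem.Chars.isspace c = true
        · simp only [List.flatMap_cons, hm, List.cons_append, List.nil_append,
            PySem.Chars.split₀.go, pvScanB, h12, if_false, if_true, hw,
            List.isEmpty_reverse]
          by_cases hc : cur.isEmpty
          · simpa [hc] using ih [] acc
          · simpa [hc] using ih [] (cur.reverse :: acc)
        · push Not at hs
          obtain ⟨hne1, hne2, hne3⟩ := hs
          simp only [List.flatMap_cons, hm, List.cons_append, List.nil_append,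
            PySem.Chars.split₀.go, hw, Bool.false_eq_true, if_false]
          rw [ih (c :: cur) acc]
          simp [pvScanB, h12, hw, hne1, hne2, hne3]

theorem pvScanB_repSpace (s : List Char) :
    ∀ (buf : List Char) (words : List (List Char)),
      pvScanB (pvRepSpace s) buf words = pvScanB s buf words := by
  induction s using pvRepSpace.induct with
  | case1 => intro buf words; simp [pvRepSpace]
  | case2 c t hp ih =>
    intro buf words
    obtain ⟨hc, t1, ht⟩ : c = ' ' ∧ ∃ t', t = '-' :: ' ' :: t' := by
      cases t with
      | nil => simp [List.isPrefixOf] at hp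
      | cons d u =>
        cases u with
        | nil => simp [List.isPrefixOf] at hp
        | cons e v =>
          simp [List.isPrefixOf] at hp
          exact ⟨hp.1.symm, v, by simp [← hp.2.1, ← hp.2.2]⟩
    subst hc ht
    rw [pvRepSpace]
    simp only [hp, if_true, List.drop_succ_cons, List.drop_zero] at ih ⊢
    have hsp : PySem.Chars.isspace ' ' = true := by decide
    by_cases hb : buf.isEmpty
    · simp [pvScanB, hb, hsp, ih [] words]
    · simp [pvScanB, hb, hsp, ih [] (words ++ [buf])]
  | case3 c t hp ih =>
    intro buf words
    rw [pvRepSpace]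
    simp only [hp]
    by_cases h12 : c = '.' ∨ c = '\''
    · simp [pvScanB, h12, ih]
    · by_cases hcond : (PySem.Chars.isspace c || c = '&' || c = '/' || c = '-') = true
      · by_cases hb : buf.isEmpty
        · simp [pvScanB, h12, hcond, hb, ih]
        · simp [pvScanB, h12, hcond, hb, ih]
      · simp [pvScanB, h12, hcond, ih]

theorem pvScanB_nonempty (s : List Char) :
    ∀ (buf : List Char) (words : List (List Char)),
      (∀ p ∈ words, p ≠ []) → ∀ p ∈ pvScanB s buf words, p ≠ [] := by
  induction s with
  | nil =>
    intro buf words h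
    by_cases hb : buf.isEmpty
    · simpa [pvScanB, hb] using h
    · intro p hp
      simp [pvScanB, hb] at hp
      rcases hp with hp | hp
      · exact h p hp
      · subst hp; simpa [List.isEmpty_iff] using hb
  | cons c t ih =>
    intro buf words h
    by_cases h12 : c = '.' ∨ c = '\''
    · simpa [pvScanB, h12] using ih buf words h
    · by_cases hcond : (PySem.Chars.isspace c || c = '&' || c = '/' || c = '-') = true
      · by_cases hb : buf.isEmpty
        · simpa [pvScanB, h12, hcond, hb] using ih [] words h
        · refine fun p hp => ?_
          simp only [pvScanB, h12, if_false, hcond, if_true, hb] at hp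
          refine ih [] (words ++ [buf]) ?_ p hp
          intro q hq
          simp at hq
          rcases hq with hq | hq
          · exact h q hq
          · subst hq; simpa [List.isEmpty_iff] using hb
      · simpa [pvScanB, h12, hcond] using ih (buf ++ [c]) words h

theorem pvJoin_empty_iff (W : List (List Char)) (h : ∀ p ∈ W, p ≠ []) :
    (PySem.Chars.join ['_'] W).isEmpty = W.isEmpty := by
  cases W with
  | nil => simp [PySem.Chars.join, List.intercalate]
  | cons w rest =>
    cases rest with
    | nil => simp [PySem.Chars.join, List.intercalate, h w (by simp)]
    | cons w2 rest2 =>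
      simp [PySem.Chars.join, List.intercalate, h w (by simp)]

-- ===== VERDICT (by name: the statement is the Claim_ definition above) =====
theorem pvChain_full (tk : List Char) :
    PySem.Chars.replace (PySem.Chars.replace (PySem.Chars.replace (PySem.Chars.replace
      (PySem.Chars.replace (PySem.Chars.replace tk [' ', '-', ' '] [' ']) ['&'] [' '])
      ['.'] []) ['\''] []) ['/'] [' ']) ['-'] [' '] = (pvRepSpace tk).flatMap pvM := by
  rw [pvReplace_space, pvReplace_single, pvReplace_single, pvReplace_single,
    pvReplace_single, pvReplace_single, pvChain_eq_flatMap]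

theorem pvSplit_eq_scan (tk : List Char) :
    PySem.Chars.split₀ ((pvRepSpace tk).flatMap pvM) = pvScanB tk [] [] := by
  have h := pvSplit_go_eq_scan (pvRepSpace tk) [] []
  simpa [PySem.Chars.split₀, pvScanB_repSpace] using h

theorem slugify_focus_token_py_spec : Claim_equal_slugify_focus_token_py := by
  intro value _
  unfold Spec_slugify_focus_token_py
  simp only [slugify_focus_token_py, slugify_focus_token_py_alt]
  set tok := PySem.Chars.lower (PySem.Chars.strip (if value = "" then [] else value.toList))
    with htok
  by_cases he : tok.isEmpty
  · simp [he]
  · have hne : ∀ p ∈ pvScanB tok [] [], p ≠ [] := pvScanB_nonempty tok [] [] (by simp)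
    have hfilt : (pvScanB tok [] []).filter (fun p => !p.isEmpty) = pvScanB tok [] [] :=
      List.filter_eq_self.mpr (fun p hp => by simpa [List.isEmpty_iff] using hne p hp)
    have hjoin := pvJoin_empty_iff (pvScanB tok [] []) hne
    simp only [he, if_false, Bool.false_eq_true, pvChain_full, pvSplit_eq_scan, hfilt, hjoin]
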